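-- pv_equiv track=rewrite | github.com/bjwanneng/Veriflow-agent | src/veriflow_agent/chat/handler.py | _resolve_answer_simple
-- ===== SOURCE A (Python) =====
-- def _resolve_answer_simple(user_input: str, options: list[str], default: str) -> str:
--     """Fast path: resolve user's answer without LLM call.
--
--     Handles:
--     - Empty input -> default
--     - Exact match (case-insensitive)
--     - Letter/number index (A/B/C/D or 1/2/3/4)
--     - Partial match
--     """
--     if not user_input:
--         return default
--
--     user_clean = user_input.strip().lower()
--
--     # Exact match
--     for opt in options:
--         if opt.lower() == user_clean:
--             return opt
--
--     # Letter/number index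
--     if len(user_clean) == 1:
--         # A/B/C/D -> 0/1/2/3
--         if user_clean in "abcd":
--             idx = ord(user_clean) - ord('a')
--             if 0 <= idx < len(options):
--                 return options[idx]
--         # 1/2/3/4 -> 0/1/2/3
--         if user_clean.isdigit():
--             idx = int(user_clean) - 1
--             if 0 <= idx < len(options):
--                 return options[idx]
--
--     # Partial match (option text contained in user input)
--     for opt in options:
--         if opt.lower() in user_clean:
--             return opt
--
--     # Partial match reverse (user input contained in option)
--     for opt in options:
--         if user_clean in opt.lower():
--             return opt
--
--     return default
-- ===== SOURCE B (Python) =====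
-- def _resolve_answer_simple(user_input: str, options: list[str], default: str) -> str:
--     """One-pass rank-based resolution: rank 0 exact, 1 index, 2 partial, 3 reverse;
--     return the option with the lexicographically smallest (rank, position).
--     Candidates that cannot beat the running best are skipped."""
--     if not user_input:
--         return default
--
--     uc = user_input.strip().lower()
--
--     best = None  # (rank, position, option)
--
--     # Index candidate (A-D or 1-4 style), rank 1.
--     if len(uc) == 1:
--         idx = "abcd".find(uc)
--         if idx < 0 and uc.isdigit():
--             idx = int(uc) - 1
--         if 0 <= idx < len(options):
--             best = (1, idx, options[idx])
--
--     for i, opt in enumerate(options):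
--         ol = opt.lower()
--         if ol == uc:
--             best = (0, i, opt)  # nothing beats rank 0 at the smallest position
--             break
--         if best is None:
--             if ol in uc:
--                 best = (2, i, opt)
--             elif uc in ol:
--                 best = (3, i, opt)
--         elif best[0] == 3:
--             # only a partial (rank 2) candidate can still improve the best
--             if ol in uc:
--                 best = (2, i, opt)
--         # best rank 1 or 2: only an exact match can improve it
--
--     return best[2] if best is not None else default
-- ===== Notes on version B (the rewrite author's own statement) =====
-- stated objective: alternative
-- what changed: Replaces A's four sequential scans (exact loop, index block, partial loop, reverse loop) by a single pass over enumerate(options) that keeps the lexicographically smallest (rank, position) candidate, with the letter/number index seeded as a rank-1 candidate.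
import Mathlib
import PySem

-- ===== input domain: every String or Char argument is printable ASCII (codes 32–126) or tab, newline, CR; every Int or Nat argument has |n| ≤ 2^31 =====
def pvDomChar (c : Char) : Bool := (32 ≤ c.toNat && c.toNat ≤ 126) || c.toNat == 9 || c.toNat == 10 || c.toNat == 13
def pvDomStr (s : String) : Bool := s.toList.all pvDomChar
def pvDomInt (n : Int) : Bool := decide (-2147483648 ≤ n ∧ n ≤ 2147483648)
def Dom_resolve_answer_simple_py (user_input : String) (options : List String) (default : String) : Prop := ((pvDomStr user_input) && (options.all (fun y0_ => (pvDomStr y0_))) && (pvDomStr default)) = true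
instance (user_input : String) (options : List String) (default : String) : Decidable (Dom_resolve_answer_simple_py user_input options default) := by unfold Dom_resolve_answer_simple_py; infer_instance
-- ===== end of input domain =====

-- B resolves the answer in ONE pass over the options by minimising a (rank, position) key
-- (0 exact / 1 letter-number index / 2 partial / 3 reverse) instead of A's four sequential scans;
-- objective: alternative decomposition, same asymptotic cost.


-- ===== PORT A =====
-- for opt in options: if opt.lower() == user_clean: return opt
def pvAExact (u : List Char) : List String → Option String
  | [] => none
  | o :: t => if PySem.Chars.lower o.toList = u then some o else pvAExact u t

-- for opt in options: if opt.lower() in user_clean: return opt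
def pvAPartial (u : List Char) : List String → Option String
  | [] => none
  | o :: t => if PySem.Chars.isIn (PySem.Chars.lower o.toList) u then some o else pvAPartial u t

-- for opt in options: if user_clean in opt.lower(): return opt
def pvARev (u : List Char) : List String → Option String
  | [] => none
  | o :: t => if PySem.Chars.isIn u (PySem.Chars.lower o.toList) then some o else pvARev u t

-- the letter/number index block of A (caller guarantees u.length = 1, so headD's default is never read)
def pvAIndex (u : List Char) (options : List String) : Option String :=
  let letter : Option String :=
    if PySem.Chars.isIn u "abcd".toList then
      let idx : Int := ((u.headD ' ').toNat : Int) - ('a'.toNat : Int)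
      if 0 ≤ idx ∧ idx < (options.length : Int) then PySem.List.pyGet? options idx else none
    else none
  match letter with
  | some o => some o
  | none =>
    if PySem.Chars.strIsdigit u then
      match PySem.Int.ofChars? u with
      | some n =>
        let idx : Int := n - 1
        if 0 ≤ idx ∧ idx < (options.length : Int) then PySem.List.pyGet? options idx else none
      | none => none
    else none

def resolve_answer_simple_py (user_input : String) (options : List String) (default : String) : String :=
  if user_input = "" then default
  else
    let u := PySem.Chars.lower (PySem.Chars.strip user_input.toList)
    match pvAExact u options with
    | some o => o
    | none =>
      match (if u.length = 1 then pvAIndex u options else none) with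
      | some o => o
      | none =>
        match pvAPartial u options with
        | some o => o
        | none =>
          match pvARev u options with
          | some o => o
          | none => default

-- ===== PORT B =====
-- for i, opt in enumerate(options): exact breaks; partial/reverse taken only when they can improve best
def pvLoop (u : List Char) (best : Option (Nat × Nat × String)) (i : Nat) : List String → Option (Nat × Nat × String)
  | [] => best
  | o :: t =>
    let ol := PySem.Chars.lower o.toList
    if ol = u then some (0, i, o)
    else
      match best with
      | none =>
        if PySem.Chars.isIn ol u then pvLoop u (some (2, i, o)) (i + 1) t
        else if PySem.Chars.isIn u ol then pvLoop u (some (3, i, o)) (i + 1) t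
        else pvLoop u none (i + 1) t
      | some b =>
        if b.1 = 3 then
          if PySem.Chars.isIn ol u then pvLoop u (some (2, i, o)) (i + 1) t
          else pvLoop u best (i + 1) t
        else pvLoop u best (i + 1) t

-- idx = "abcd".find(uc); if idx < 0 and uc.isdigit(): idx = int(uc) - 1
def pvBIndexInt (u : List Char) : Int :=
  let f := PySem.Chars.find "abcd".toList u
  if f < 0 ∧ PySem.Chars.strIsdigit u then
    match PySem.Int.ofChars? u with
    | some n => n - 1
    | none => f
  else f

-- the initial candidate: (1, idx, options[idx]) when the single char resolves to a valid index
def pvBest0 (u : List Char) (options : List String) : Option (Nat × Nat × String) :=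
  if u.length = 1 then
    let idx := pvBIndexInt u
    if 0 ≤ idx ∧ idx < (options.length : Int) then
      match PySem.List.pyGet? options idx with
      | some o => some (1, idx.toNat, o)
      | none => none
    else none
  else none

def resolve_answer_simple_py_alt (user_input : String) (options : List String) (default : String) : String :=
  if user_input = "" then default
  else
    let u := PySem.Chars.lower (PySem.Chars.strip user_input.toList)
    match pvLoop u (pvBest0 u options) 0 options with
    | some b => b.2.2
    | none => default

-- ===== PRECONDITION & SPEC =====
def Spec_resolve_answer_simple_py (user_input : String) (options : List String) (default : String) (out : String) : Prop := out = resolve_answer_simple_py_alt user_input options default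
instance (user_input : String) (options : List String) (default : String) (out : String) : Decidable (Spec_resolve_answer_simple_py user_input options default out) := by unfold Spec_resolve_answer_simple_py; infer_instance

-- ===== CLAIM (what is proved, stated in full; the proofs are below) =====
def Claim_equal_resolve_answer_simple_py : Prop := ∀ (user_input : String) (options : List String) (default : String), Dom_resolve_answer_simple_py user_input options default → Spec_resolve_answer_simple_py user_input options default (resolve_answer_simple_py user_input options default)

-- ===== LEMMAS AND PROOFS =====

-- proof-side: rank of one option: 0 exact, 2 partial, 3 reverse, none otherwise
def pvRank (u : List Char) (o : String) : Option Nat :=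
  let ol := PySem.Chars.lower o.toList
  if ol = u then some 0
  else if PySem.Chars.isIn ol u then some 2
  else if PySem.Chars.isIn u ol then some 3
  else none

-- proof-side: lexicographic comparison of (rank, position) keys
def pvLt (a b : Nat × Nat) : Bool := a.1 < b.1 || (a.1 == b.1 && a.2 < b.2)

-- proof-side: keep the smaller of best and the candidate c (best wins ties)
def pvMerge (best : Option (Nat × Nat × String)) (c : Nat × Nat × String) : Option (Nat × Nat × String) :=
  match best with
  | none => some c
  | some b => if pvLt (c.1, c.2.1) (b.1, b.2.1) then some c else some b

-- proof-side: the minimum (rank, position) candidate of the list alone (no initial candidate)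
def pvPure (u : List Char) (k : Nat) : List String → Option (Nat × Nat × String)
  | [] => none
  | o :: t =>
    let rest := pvPure u (k + 1) t
    match pvRank u o with
    | none => rest
    | some r =>
      match rest with
      | none => some (r, k, o)
      | some b => if pvLt (b.1, b.2.1) (r, k) then some b else some (r, k, o)

def pvMergeO (b : Option (Nat × Nat × String)) : Option (Nat × Nat × String) → Option (Nat × Nat × String)
  | none => b
  | some c => pvMerge b c

lemma pvPure_idx_ge (u : List Char) (t : List String) : ∀ (k : Nat) r j s, pvPure u k t = some (r, j, s) → k ≤ j := by
  induction t with
  | nil => intro k r j s h; simp [pvPure] at h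
  | cons o t ih =>
    intro k r j s h
    cases hr : pvRank u o with
    | none =>
      simp only [pvPure, hr] at h
      exact Nat.le_of_succ_le (ih (k + 1) r j s h)
    | some r' =>
      simp only [pvPure, hr] at h
      cases hp : pvPure u (k + 1) t with
      | none => simp only [hp] at h; cases h; omega
      | some b =>
        obtain ⟨rb, jb, sb⟩ := b
        have hge := ih (k + 1) rb jb sb hp
        simp only [hp] at h
        split at h
        · cases h; omega
        · cases h; omega

lemma pvLt_eq_true_iff (a b : Nat × Nat) : pvLt a b = true ↔ (a.1 < b.1 ∨ (a.1 = b.1 ∧ a.2 < b.2)) := by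
  simp [pvLt]

lemma pvLt_eq_false_iff (a b : Nat × Nat) : pvLt a b = false ↔ ¬ (a.1 < b.1 ∨ (a.1 = b.1 ∧ a.2 < b.2)) := by
  rw [← pvLt_eq_true_iff]
  cases h : pvLt a b <;> simp

lemma pvMergeO_none_left (x : Option (Nat × Nat × String)) : pvMergeO none x = x := by
  cases x <;> rfl

lemma pvMergeO_skip (b c : Nat × Nat × String) (p : Option (Nat × Nat × String))
    (hcb : pvLt (c.1, c.2.1) (b.1, b.2.1) = true) :
    pvMergeO (some b) (pvMergeO (some c) p) = pvMergeO (some c) p := by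
  rw [pvLt_eq_true_iff] at hcb
  cases p with
  | none =>
    simp only [pvMergeO, pvMerge]
    rw [if_pos (by rw [pvLt_eq_true_iff]; omega)]
  | some q =>
    rw [show pvMergeO (some c) (some q) =
        if pvLt (q.1, q.2.1) (c.1, c.2.1) = true then some q else some c from rfl]
    rw [apply_ite (pvMergeO (some b))]
    simp only [pvMergeO, pvMerge]
    split_ifs with h1 h2 h3 <;>
      first
        | rfl
        | (simp only [pvLt_eq_true_iff] at *; omega)

lemma pvMergeO_absorb (b c : Nat × Nat × String) (p : Option (Nat × Nat × String))
    (hcb : pvLt (c.1, c.2.1) (b.1, b.2.1) = false) :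
    pvMergeO (some b) (pvMergeO (some c) p) = pvMergeO (some b) p := by
  rw [pvLt_eq_false_iff] at hcb
  cases p with
  | none =>
    simp only [pvMergeO, pvMerge]
    rw [if_neg (by rw [pvLt_eq_true_iff]; omega)]
  | some q =>
    rw [show pvMergeO (some c) (some q) =
        if pvLt (q.1, q.2.1) (c.1, c.2.1) = true then some q else some c from rfl]
    rw [apply_ite (pvMergeO (some b))]
    simp only [pvMergeO, pvMerge]
    split_ifs with h1 h2 h3 <;>
      first
        | rfl
        | (simp only [pvLt_eq_true_iff] at *; omega)

lemma pvLoop_eq_merge (u : List Char) (t : List String) : ∀ (k : Nat) (best : Option (Nat × Nat × String)),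
    (∀ r j s, best = some (r, j, s) → 1 ≤ r ∧ r ≤ 3 ∧ (j < k ∨ r = 1)) →
    pvLoop u best k t = pvMergeO best (pvPure u k t) := by
  induction t with
  | nil => intro k best hb; simp [pvLoop, pvPure, pvMergeO]
  | cons o t ih =>
    intro k best hb
    by_cases h0 : PySem.Chars.lower o.toList = u
    · -- exact head: the loop breaks with (0, k, o), which is also the overall minimum
      have hr : pvRank u o = some 0 := by simp [pvRank, h0]
      have hpure : pvPure u k (o :: t) = some (0, k, o) := by
        cases hp : pvPure u (k + 1) t with
        | none => simp [pvPure, hr, hp]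
        | some p =>
          obtain ⟨rp, jp, sp⟩ := p
          have hge := pvPure_idx_ge u t (k + 1) rp jp sp hp
          simp only [pvPure, hr, hp]
          rw [if_neg (by rw [pvLt_eq_true_iff]; simp; omega)]
      rw [hpure]
      simp only [pvLoop, if_pos h0]
      cases best with
      | none => simp [pvMergeO, pvMerge]
      | some b =>
        obtain ⟨rb, jb, sb⟩ := b
        obtain ⟨hb1, _, _⟩ := hb rb jb sb rfl
        simp only [pvMergeO, pvMerge]
        rw [if_pos (by rw [pvLt_eq_true_iff]; simp; omega)]
    · by_cases h2 : PySem.Chars.isIn (PySem.Chars.lower o.toList) u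
      · -- partial head, rank 2
        have hr : pvRank u o = some 2 := by simp [pvRank, h0, h2]
        have hps : pvPure u k (o :: t) = pvMergeO (some (2, k, o)) (pvPure u (k + 1) t) := by
          cases hp : pvPure u (k + 1) t <;> simp [pvPure, hr, hp, pvMergeO, pvMerge]
        rw [hps]
        cases best with
        | none =>
          simp only [pvLoop, if_neg h0, if_pos h2]
          rw [ih (k + 1) (some (2, k, o)) (by intro r j s h; cases h; omega)]
          rw [pvMergeO_none_left]
        | some b =>
          obtain ⟨rb, jb, sb⟩ := b
          obtain ⟨hb1, hb3, hbj⟩ := hb rb jb sb rfl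
          by_cases hr3 : rb = 3
          · subst hr3
            have hstep : pvLoop u (some (3, jb, sb)) k (o :: t) =
                pvLoop u (some (2, k, o)) (k + 1) t := by
              simp only [pvLoop, if_neg h0, if_pos h2]
              simp
            rw [hstep, ih (k + 1) (some (2, k, o)) (by intro r j s h; cases h; omega)]
            rw [pvMergeO_skip _ _ _ (by rw [pvLt_eq_true_iff]; simp)]
          · have hstep : pvLoop u (some (rb, jb, sb)) k (o :: t) =
                pvLoop u (some (rb, jb, sb)) (k + 1) t := by
              simp only [pvLoop, if_neg h0]
              rw [if_neg (by simpa using hr3)]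
            rw [hstep, ih (k + 1) (some (rb, jb, sb)) (by intro r j s h; cases h; omega)]
            rw [pvMergeO_absorb _ _ _ (by rw [pvLt_eq_false_iff]; simp; omega)]
      · by_cases h3 : PySem.Chars.isIn u (PySem.Chars.lower o.toList)
        · -- reverse head, rank 3
          have hr : pvRank u o = some 3 := by simp [pvRank, h0, h2, h3]
          have hps : pvPure u k (o :: t) = pvMergeO (some (3, k, o)) (pvPure u (k + 1) t) := by
            cases hp : pvPure u (k + 1) t <;> simp [pvPure, hr, hp, pvMergeO, pvMerge]
          rw [hps]
          cases best with
          | none =>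
            simp only [pvLoop, if_neg h0, if_neg h2, if_pos h3]
            rw [ih (k + 1) (some (3, k, o)) (by intro r j s h; cases h; omega)]
            rw [pvMergeO_none_left]
          | some b =>
            obtain ⟨rb, jb, sb⟩ := b
            obtain ⟨hb1, hb3, hbj⟩ := hb rb jb sb rfl
            have hstep : pvLoop u (some (rb, jb, sb)) k (o :: t) =
                pvLoop u (some (rb, jb, sb)) (k + 1) t := by
              simp only [pvLoop, if_neg h0]
              by_cases hr3 : rb = 3
              · subst hr3; simp [h2]
              · rw [if_neg (by simpa using hr3)]
            rw [hstep, ih (k + 1) (some (rb, jb, sb)) (by intro r j s h; cases h; omega)]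
            rw [pvMergeO_absorb _ _ _ (by rw [pvLt_eq_false_iff]; simp; omega)]
        · -- head contributes nothing
          have hr : pvRank u o = none := by simp [pvRank, h0, h2, h3]
          have hps : pvPure u k (o :: t) = pvPure u (k + 1) t := by simp [pvPure, hr]
          rw [hps]
          cases best with
          | none =>
            simp only [pvLoop, if_neg h0, if_neg h2, if_neg h3]
            exact ih (k + 1) none (by intro r j s h; cases h)
          | some b =>
            obtain ⟨rb, jb, sb⟩ := b
            obtain ⟨hb1, hb3, hbj⟩ := hb rb jb sb rfl
            have hstep : pvLoop u (some (rb, jb, sb)) k (o :: t) =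
                pvLoop u (some (rb, jb, sb)) (k + 1) t := by
              simp only [pvLoop, if_neg h0]
              by_cases hr3 : rb = 3
              · subst hr3; simp [h2]
              · rw [if_neg (by simpa using hr3)]
            rw [hstep]
            exact ih (k + 1) (some (rb, jb, sb)) (by intro r j s h; cases h; omega)

-- characterisation of pvPure by A's three scans
lemma pvPure_char (u : List Char) (t : List String) : ∀ (k : Nat),
    ((∀ o, pvAExact u t = some o → ∃ i, pvPure u k t = some (0, i, o)) ∧
     (pvAExact u t = none → ∀ r j s, pvPure u k t = some (r, j, s) → 2 ≤ r) ∧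
     (pvAExact u t = none → ∀ o, pvAPartial u t = some o → ∃ i, pvPure u k t = some (2, i, o)) ∧
     (pvAExact u t = none → pvAPartial u t = none → ∀ r j s, pvPure u k t = some (r, j, s) → r = 3) ∧
     (pvAExact u t = none → pvAPartial u t = none → ∀ o, pvARev u t = some o → ∃ i, pvPure u k t = some (3, i, o)) ∧
     (pvAExact u t = none → pvAPartial u t = none → pvARev u t = none → pvPure u k t = none)) := by
  induction t with
  | nil =>
    intro k
    refine ⟨?_, ?_, ?_, ?_, ?_, ?_⟩ <;> simp [pvAExact, pvAPartial, pvARev, pvPure]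
  | cons o t ih =>
    intro k
    obtain ⟨ih1, ih2, ih3, ih4, ih5, ih6⟩ := ih (k + 1)
    by_cases h0 : PySem.Chars.lower o.toList = u
    · have hr : pvRank u o = some 0 := by simp [pvRank, h0]
      refine ⟨?_, ?_, ?_, ?_, ?_, ?_⟩
      · intro o' he
        simp only [pvAExact, if_pos h0, Option.some.injEq] at he
        subst he
        cases hp : pvPure u (k + 1) t with
        | none => exact ⟨k, by simp [pvPure, hr, hp]⟩
        | some p =>
          obtain ⟨rp, jp, sp⟩ := p
          have hge := pvPure_idx_ge u t (k + 1) rp jp sp hp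
          refine ⟨k, ?_⟩
          simp only [pvPure, hr, hp]
          rw [if_neg]
          simp only [pvLt, Bool.or_eq_true, Bool.and_eq_true, decide_eq_true_eq, beq_iff_eq]
          omega
      all_goals (intro hne; simp [pvAExact, if_pos h0] at hne)
    · have hex : pvAExact u (o :: t) = pvAExact u t := by simp [pvAExact, h0]
      by_cases h2 : PySem.Chars.isIn (PySem.Chars.lower o.toList) u
      · have hr : pvRank u o = some 2 := by simp [pvRank, h0, h2]
        have hpa : pvAPartial u (o :: t) = some o := by simp [pvAPartial, h2]
        refine ⟨?_, ?_, ?_, ?_, ?_, ?_⟩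
        · intro o' he
          rw [hex] at he
          obtain ⟨i, hp⟩ := ih1 o' he
          have hge := pvPure_idx_ge u t (k + 1) 0 i o' hp
          refine ⟨i, ?_⟩
          simp only [pvPure, hr, hp]
          rw [if_pos]
          simp [pvLt]
        · intro hne r j s hp
          rw [hex] at hne
          cases hq : pvPure u (k + 1) t with
          | none => simp only [pvPure, hr, hq] at hp; cases hp; omega
          | some p =>
            obtain ⟨rp, jp, sp⟩ := p
            have h2p := ih2 hne rp jp sp hq
            simp only [pvPure, hr, hq] at hp
            split at hp
            · cases hp; omega
            · cases hp; omega
        · intro hne o' hpo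
          rw [hex] at hne
          rw [hpa] at hpo
          cases hpo
          cases hq : pvPure u (k + 1) t with
          | none => exact ⟨k, by simp [pvPure, hr, hq]⟩
          | some p =>
            obtain ⟨rp, jp, sp⟩ := p
            have h2p := ih2 hne rp jp sp hq
            have hge := pvPure_idx_ge u t (k + 1) rp jp sp hq
            refine ⟨k, ?_⟩
            simp only [pvPure, hr, hq]
            rw [if_neg]
            simp only [pvLt, Bool.or_eq_true, Bool.and_eq_true, decide_eq_true_eq, beq_iff_eq]
            omega
        · intro hne hpn; rw [hpa] at hpn; cases hpn
        · intro hne hpn; rw [hpa] at hpn; cases hpn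
        · intro hne hpn; rw [hpa] at hpn; cases hpn
      · have hpar : pvAPartial u (o :: t) = pvAPartial u t := by simp [pvAPartial, h2]
        by_cases h3 : PySem.Chars.isIn u (PySem.Chars.lower o.toList)
        · have hr : pvRank u o = some 3 := by simp [pvRank, h0, h2, h3]
          have hre : pvARev u (o :: t) = some o := by simp [pvARev, h3]
          refine ⟨?_, ?_, ?_, ?_, ?_, ?_⟩
          · intro o' he
            rw [hex] at he
            obtain ⟨i, hp⟩ := ih1 o' he
            refine ⟨i, ?_⟩
            simp only [pvPure, hr, hp]
            rw [if_pos]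
            simp [pvLt]
          · intro hne r j s hp
            rw [hex] at hne
            cases hq : pvPure u (k + 1) t with
            | none => simp only [pvPure, hr, hq] at hp; cases hp; omega
            | some p =>
              obtain ⟨rp, jp, sp⟩ := p
              have h2p := ih2 hne rp jp sp hq
              simp only [pvPure, hr, hq] at hp
              split at hp
              · cases hp; omega
              · cases hp; omega
          · intro hne o' hpo
            rw [hex] at hne
            rw [hpar] at hpo
            obtain ⟨i, hp⟩ := ih3 hne o' hpo
            refine ⟨i, ?_⟩
            simp only [pvPure, hr, hp]
            rw [if_pos]
            simp [pvLt]
          · intro hne hpn r j s hp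
            rw [hex] at hne
            rw [hpar] at hpn
            cases hq : pvPure u (k + 1) t with
            | none => simp only [pvPure, hr, hq] at hp; cases hp; rfl
            | some p =>
              obtain ⟨rp, jp, sp⟩ := p
              have h3p := ih4 hne hpn rp jp sp hq
              simp only [pvPure, hr, hq] at hp
              split at hp
              · cases hp; omega
              · cases hp; rfl
          · intro hne hpn o' hro
            rw [hex] at hne
            rw [hpar] at hpn
            rw [hre] at hro
            cases hro
            cases hq : pvPure u (k + 1) t with
            | none => exact ⟨k, by simp [pvPure, hr, hq]⟩
            | some p =>
              obtain ⟨rp, jp, sp⟩ := p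
              have h3p := ih4 hne hpn rp jp sp hq
              have hge := pvPure_idx_ge u t (k + 1) rp jp sp hq
              refine ⟨k, ?_⟩
              simp only [pvPure, hr, hq]
              rw [if_neg]
              simp only [pvLt, Bool.or_eq_true, Bool.and_eq_true, decide_eq_true_eq, beq_iff_eq]
              omega
          · intro hne hpn hrn; rw [hre] at hrn; cases hrn
        · have hr : pvRank u o = none := by simp [pvRank, h0, h2, h3]
          have hrev : pvARev u (o :: t) = pvARev u t := by simp [pvARev, h3]
          have hpp : pvPure u k (o :: t) = pvPure u (k + 1) t := by simp [pvPure, hr]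
          rw [hex, hpar, hrev, hpp]
          exact ⟨ih1, ih2, ih3, ih4, ih5, ih6⟩

lemma pvAbcdToList : "abcd".toList = ['a', 'b', 'c', 'd'] := by decide

lemma pvFindAbcd (c : Char) : PySem.Chars.find "abcd".toList [c] =
    if c = 'a' then 0 else if c = 'b' then 1 else if c = 'c' then 2 else if c = 'd' then 3 else -1 := by
  split_ifs with h1 h2 h3 h4
  · subst h1; decide
  · subst h2; decide
  · subst h3; decide
  · subst h4; decide
  · rw [PySem.Chars.find_eq_neg_one_iff]
    intro hinf
    have hmem := List.singleton_sublist.mp hinf.sublist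
    rw [pvAbcdToList] at hmem
    simp only [List.mem_cons, List.not_mem_nil, or_false] at hmem
    tauto

lemma pvNotInAbcd (c : Char) (h1 : c ≠ 'a') (h2 : c ≠ 'b') (h3 : c ≠ 'c') (h4 : c ≠ 'd') :
    PySem.Chars.isIn [c] "abcd".toList = false := by
  rw [PySem.Chars.isIn_eq_false_iff]
  rw [← PySem.Chars.find_eq_neg_one_iff, pvFindAbcd]
  simp [h1, h2, h3, h4]

lemma pvMapIdx (options : List String) (idx : Int) :
    (if 0 ≤ idx ∧ idx < (options.length : Int) then
      match PySem.List.pyGet? options idx with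
      | some o => some ((1 : Nat), idx.toNat, o)
      | none => none
    else none) =
    Option.map (fun o => ((1 : Nat), idx.toNat, o))
      (if 0 ≤ idx ∧ idx < (options.length : Int) then PySem.List.pyGet? options idx else none) := by
  split_ifs with h
  · cases PySem.List.pyGet? options idx <;> simp
  · rfl

lemma pvBest0_eq (u : List Char) (options : List String) (h : u.length = 1) :
    pvBest0 u options = Option.map (fun o => (1, (pvBIndexInt u).toNat, o)) (pvAIndex u options) := by
  match u, h with
  | [c], _ =>
    by_cases hd : PySem.Chars.strIsdigit [c]
    · have hfa : PySem.Chars.find "abcd".toList [c] = -1 := by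
        rw [pvFindAbcd]
        split_ifs with h1 h2 h3 h4 <;> first
          | rfl
          | (subst_vars; exact absurd hd (by decide))
      have hni : PySem.Chars.isIn [c] "abcd".toList = false := by
        apply pvNotInAbcd <;> (rintro rfl; exact absurd hd (by decide))
      have hb : pvBIndexInt [c] =
          (match PySem.Int.ofChars? [c] with | some n => n - 1 | none => (-1 : Int)) := by
        simp only [pvBIndexInt, hfa, hd]
        norm_num
      cases hn : PySem.Int.ofChars? [c] with
      | some n =>
        rw [hn] at hb
        simp only [pvBest0, pvAIndex, hni, hd, hn, hb, List.length_singleton, if_true,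
          Bool.false_eq_true, if_false]
        exact pvMapIdx options (n - 1)
      | none =>
        rw [hn] at hb
        rw [pvAbcdToList] at hni
        simp [pvBest0, pvAIndex, hni, hd, hn, hb, pvAbcdToList]
    · have hb : pvBIndexInt [c] = PySem.Chars.find "abcd".toList [c] := by
        simp only [pvBIndexInt, hd]
        norm_num
      by_cases h1 : c = 'a'
      · subst h1
        have hA : pvAIndex ['a'] options =
            (if 0 ≤ (0 : Int) ∧ (0 : Int) < (options.length : Int) then PySem.List.pyGet? options 0 else none) := by
          simp only [pvAIndex]
          rw [if_pos (by decide)]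
          have : ((['a'].headD ' ').toNat : Int) - ('a'.toNat : Int) = 0 := by decide
          rw [this]
          split_ifs with hrg
          · cases hg : PySem.List.pyGet? options 0 <;> simp
          · simp
        rw [hA]
        simp only [pvBest0, hb, pvFindAbcd, List.length_singleton, if_true]
        exact pvMapIdx options 0
      · by_cases h2 : c = 'b'
        · subst h2
          have hA : pvAIndex ['b'] options =
              (if 0 ≤ (1 : Int) ∧ (1 : Int) < (options.length : Int) then PySem.List.pyGet? options 1 else none) := by
            simp only [pvAIndex]
            rw [if_pos (by decide)]
            have : ((['b'].headD ' ').toNat : Int) - ('a'.toNat : Int) = 1 := by decide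
            rw [this]
            split_ifs with hrg
            · cases PySem.List.pyGet? options 1 <;> simp
            · simp
          rw [hA]
          simp only [pvBest0, hb, pvFindAbcd, List.length_singleton, if_true]
          exact pvMapIdx options 1
        · by_cases h3 : c = 'c'
          · subst h3
            have hA : pvAIndex ['c'] options =
                (if 0 ≤ (2 : Int) ∧ (2 : Int) < (options.length : Int) then PySem.List.pyGet? options 2 else none) := by
              simp only [pvAIndex]
              rw [if_pos (by decide)]
              have : ((['c'].headD ' ').toNat : Int) - ('a'.toNat : Int) = 2 := by decide
              rw [this]
              split_ifs with hrg
              · cases PySem.List.pyGet? options 2 <;> simp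
              · simp
            rw [hA]
            simp only [pvBest0, hb, pvFindAbcd, List.length_singleton, if_true]
            exact pvMapIdx options 2
          · by_cases h4 : c = 'd'
            · subst h4
              have hA : pvAIndex ['d'] options =
                  (if 0 ≤ (3 : Int) ∧ (3 : Int) < (options.length : Int) then PySem.List.pyGet? options 3 else none) := by
                simp only [pvAIndex]
                rw [if_pos (by decide)]
                have : ((['d'].headD ' ').toNat : Int) - ('a'.toNat : Int) = 3 := by decide
                rw [this]
                split_ifs with hrg
                · cases PySem.List.pyGet? options 3 <;> simp
                · simp
              rw [hA]
              simp only [pvBest0, hb, pvFindAbcd, List.length_singleton, if_true]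
              exact pvMapIdx options 3
            · have hni := pvNotInAbcd c h1 h2 h3 h4
              have hfa : PySem.Chars.find "abcd".toList [c] = -1 := by
                rw [pvFindAbcd]; simp [h1, h2, h3, h4]
              rw [hfa] at hb
              rw [pvAbcdToList] at hni
              simp [pvBest0, pvAIndex, hb, hni, hd, pvAbcdToList]

lemma pvBest0_rank (u : List Char) (options : List String) (r j : Nat) (s : String)
    (h : pvBest0 u options = some (r, j, s)) : r = 1 := by
  simp only [pvBest0] at h
  split_ifs at h
  cases hg : PySem.List.pyGet? options (pvBIndexInt u) with
  | some o => rw [hg] at h; cases h; rfl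
  | none => rw [hg] at h; cases h

-- the tail of A (partial, then reverse, then default) agrees with B when there is no exact match
-- and no index candidate
lemma pvTail (u : List Char) (options : List String) (default : String)
    (he : pvAExact u options = none) :
    (match pvAPartial u options with
     | some o => o
     | none =>
       match pvARev u options with
       | some o => o
       | none => default) =
    (match pvPure u 0 options with | some b => b.2.2 | none => default) := by
  obtain ⟨m1, m2, m3, m4, m5, m6⟩ := pvPure_char u options 0
  cases hp : pvAPartial u options with
  | some o => obtain ⟨i, hq⟩ := m3 he o hp; simp [hq]
  | none =>
    cases hr : pvARev u options with
    | some o => obtain ⟨i, hq⟩ := m5 he hp o hr; simp [hq]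
    | none => simp [m6 he hp hr]

-- ===== VERDICT (by name: the statement is the Claim_ definition above) =====
theorem resolve_answer_simple_py_spec : Claim_equal_resolve_answer_simple_py := by
  intro user_input options default _
  unfold Spec_resolve_answer_simple_py
  by_cases hemp : user_input = ""
  · simp [resolve_answer_simple_py, resolve_answer_simple_py_alt, hemp]
  · simp only [resolve_answer_simple_py, resolve_answer_simple_py_alt, if_neg hemp]
    generalize PySem.Chars.lower (PySem.Chars.strip user_input.toList) = u
    obtain ⟨m1, m2, m3, m4, m5, m6⟩ := pvPure_char u options 0
    have hloop : pvLoop u (pvBest0 u options) 0 options =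
        pvMergeO (pvBest0 u options) (pvPure u 0 options) := by
      apply pvLoop_eq_merge
      intro r j s h
      have := pvBest0_rank u options r j s h
      omega
    rw [hloop]
    cases he : pvAExact u options with
    | some o =>
      obtain ⟨i, hp⟩ := m1 o he
      rw [hp]
      cases hb0 : pvBest0 u options with
      | none => simp [pvMergeO, pvMerge]
      | some b =>
        obtain ⟨rb, jb, sb⟩ := b
        have hr1 := pvBest0_rank u options rb jb sb hb0
        subst hr1
        simp [pvMergeO, pvMerge, pvLt]
    | none =>
      by_cases hlen : u.length = 1
      · rw [if_pos hlen]
        have hbe := pvBest0_eq u options hlen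
        cases hai : pvAIndex u options with
        | some o =>
          rw [hai] at hbe
          simp only [Option.map_some] at hbe
          rw [hbe]
          cases hp : pvPure u 0 options with
          | none => simp [pvMergeO]
          | some p =>
            obtain ⟨rp, jp, sp⟩ := p
            have h2p := m2 he rp jp sp hp
            simp only [pvMergeO, pvMerge]
            rw [if_neg (by
              simp only [pvLt, Bool.or_eq_true, Bool.and_eq_true, decide_eq_true_eq, beq_iff_eq]
              omega)]
        | none =>
          rw [hai] at hbe
          simp only [Option.map_none] at hbe
          rw [hbe, pvMergeO_none_left]
          exact pvTail u options default he
      · rw [if_neg hlen]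
        have hbn : pvBest0 u options = none := by simp [pvBest0, hlen]
        rw [hbn, pvMergeO_none_left]
        exact pvTail u options default he
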